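-- pv_equiv track=rewrite | github.com/GaoCode/pytorch-lightening-smoke-detection | vis.py | calculate_overlap_ticks
-- ===== SOURCE A (Python) =====
-- def calculate_overlap_ticks(max_dim, tile_size=224, tile_overlap=20):
--     i = 0
--     dim = 0
--     ticks = []
--
--     while dim < max_dim:
--         if i == 0:
--             dim += tile_size - tile_overlap
--         elif i % 2 == 1:
--             dim += tile_overlap
--         elif i % 2 == 0:
--             dim += tile_size - tile_overlap * 2
--
--         ticks.append(dim)
--         i += 1
--
--     return ticks
-- ===== SOURCE B (Python) =====
-- def calculate_overlap_ticks(max_dim, tile_size=224, tile_overlap=20):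
--     # Closed form: tick j = (j//2 + 1)*(tile_size - tile_overlap), plus tile_overlap if j is odd.
--     # Compute the index of the first tick >= max_dim by ceiling division, then emit by formula.
--     if max_dim <= 0:
--         return []
--     p = tile_size - tile_overlap
--     if max_dim <= p:
--         n = 1
--     elif max_dim <= tile_size:
--         n = 2
--     else:
--         k_even = -(-max_dim // p) - 1
--         k_odd = -(-(max_dim - tile_overlap) // p) - 1
--         n = min(2 * k_even, 2 * k_odd + 1) + 1
--     return [(j // 2 + 1) * p + (tile_overlap if j % 2 else 0) for j in range(n)]
-- ===== Notes on version B (the rewrite author's own statement) =====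
-- stated objective: alternative
-- what changed: Replaces A's fused accumulate-and-test while loop by a closed form: the index of the first tick reaching max_dim is computed arithmetically by ceiling division, and the ticks are then emitted directly by the formula tick(j) = (j//2+1)*(tile_size-tile_overlap) (+tile_overlap if j odd), with no running accumulator.
import Mathlib
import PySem

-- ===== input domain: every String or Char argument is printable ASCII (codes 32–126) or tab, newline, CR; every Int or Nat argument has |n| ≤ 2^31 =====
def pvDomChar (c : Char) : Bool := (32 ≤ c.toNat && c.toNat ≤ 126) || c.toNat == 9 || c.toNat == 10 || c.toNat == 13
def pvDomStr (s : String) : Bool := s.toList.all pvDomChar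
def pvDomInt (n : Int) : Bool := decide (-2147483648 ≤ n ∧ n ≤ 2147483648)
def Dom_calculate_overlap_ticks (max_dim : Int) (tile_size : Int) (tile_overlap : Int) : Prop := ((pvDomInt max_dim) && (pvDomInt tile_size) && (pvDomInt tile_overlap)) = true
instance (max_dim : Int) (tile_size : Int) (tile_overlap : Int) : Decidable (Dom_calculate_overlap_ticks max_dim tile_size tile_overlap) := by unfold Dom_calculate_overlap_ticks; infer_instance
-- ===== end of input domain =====

-- B replaces A's accumulate-and-test while loop by a closed form: the cutoff index is found
-- by ceiling division and the ticks are emitted directly by formula (objective: alternative).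

-- ===== PORT A =====
-- A's while loop, one fuel unit per iteration; the fuel is a totality guard only:
-- under Pre_ the Python loop terminates in at most 2*max_dim+3 iterations, so the fuel never runs out.
def cotA (max_dim tile_size tile_overlap : Int) : Nat → Nat → Int → List Int
  | 0, _, _ => []
  | fuel + 1, i, dim =>
    if dim < max_dim then
      let dim' := if i = 0 then dim + (tile_size - tile_overlap)
                  else if i % 2 = 1 then dim + tile_overlap
                  else dim + (tile_size - tile_overlap * 2)
      dim' :: cotA max_dim tile_size tile_overlap fuel (i + 1) dim'
    else []

def calculate_overlap_ticks (max_dim : Int) (tile_size : Int) (tile_overlap : Int) : List Int :=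
  cotA max_dim tile_size tile_overlap (2 * max_dim.toNat + 4) 0 0

-- ===== PORT B =====
-- B's closed form: n = index count up to the first tick >= max_dim, then the list by formula.
-- '-(-a // p)' is Python ceiling division, ported with PySem.Int.floordiv (exact for every p;
-- under Pre_ the branch using it is only reached with p > 0, matching Source B).
def calculate_overlap_ticks_alt (max_dim : Int) (tile_size : Int) (tile_overlap : Int) : List Int :=
  if max_dim ≤ 0 then []
  else
    let p := tile_size - tile_overlap
    let n : Int :=
      if max_dim ≤ p then 1
      else if max_dim ≤ tile_size then 2
      else
        let k_even := -(PySem.Int.floordiv (-max_dim) p) - 1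
        let k_odd := -(PySem.Int.floordiv (-(max_dim - tile_overlap)) p) - 1
        min (2 * k_even) (2 * k_odd + 1) + 1
    (PySem.List.pyRange 0 n 1).map (fun j =>
      (PySem.Int.floordiv j 2 + 1) * p + (if PySem.Int.mod j 2 ≠ 0 then tile_overlap else 0))

-- ===== PRECONDITION & SPEC =====
-- Pre_ excludes exactly the inputs on which A's while loop never terminates (A returns no value
-- there): max_dim > 0 with a nonpositive net advance tile_size - tile_overlap per pair of steps
-- and max_dim beyond the largest tick ever produced (tile_size).
def Pre_calculate_overlap_ticks (max_dim : Int) (tile_size : Int) (tile_overlap : Int) : Prop :=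
  max_dim ≤ 0 ∨ 0 < tile_size - tile_overlap ∨ max_dim ≤ tile_size
instance (max_dim : Int) (tile_size : Int) (tile_overlap : Int) : Decidable (Pre_calculate_overlap_ticks max_dim tile_size tile_overlap) := by unfold Pre_calculate_overlap_ticks; infer_instance

def pvWitness_calculate_overlap_ticks : Int × Int × Int := (500, 224, 20)

def Spec_calculate_overlap_ticks (max_dim : Int) (tile_size : Int) (tile_overlap : Int) (out : List Int) : Prop := out = calculate_overlap_ticks_alt max_dim tile_size tile_overlap
instance (max_dim : Int) (tile_size : Int) (tile_overlap : Int) (out : List Int) : Decidable (Spec_calculate_overlap_ticks max_dim tile_size tile_overlap out) := by unfold Spec_calculate_overlap_ticks; infer_instance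

-- ===== CLAIM (what is proved, stated in full; the proofs are below) =====
def Claim_equal_calculate_overlap_ticks : Prop := ∀ (max_dim : Int) (tile_size : Int) (tile_overlap : Int), Dom_calculate_overlap_ticks max_dim tile_size tile_overlap → Pre_calculate_overlap_ticks max_dim tile_size tile_overlap → Spec_calculate_overlap_ticks max_dim tile_size tile_overlap (calculate_overlap_ticks max_dim tile_size tile_overlap)

-- ===== LEMMAS AND PROOFS =====

-- the closed-form tick value at (0-based) index j
def tickF (tile_size tile_overlap : Int) (j : Nat) : Int :=
  ((j / 2 : Nat) + 1) * (tile_size - tile_overlap) + (if j % 2 = 1 then tile_overlap else 0)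

theorem cotA_succ (max_dim tile_size tile_overlap : Int) (f : Nat) (i : Nat) (d : Int) :
    cotA max_dim tile_size tile_overlap (f + 1) i d
      = (if d < max_dim then
          (if i = 0 then d + (tile_size - tile_overlap)
           else if i % 2 = 1 then d + tile_overlap
           else d + (tile_size - tile_overlap * 2)) ::
          cotA max_dim tile_size tile_overlap f (i + 1)
            (if i = 0 then d + (tile_size - tile_overlap)
             else if i % 2 = 1 then d + tile_overlap
             else d + (tile_size - tile_overlap * 2))
        else []) := rfl

theorem cotA_stop (max_dim tile_size tile_overlap : Int) (f : Nat) (i : Nat) (d : Int)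
    (h : ¬ d < max_dim) : cotA max_dim tile_size tile_overlap f i d = [] := by
  cases f
  · rfl
  · rw [cotA_succ, if_neg h]

-- A's increment at index i, applied to the previous tick, produces tick i.
theorem stepA_tick (tile_size tile_overlap : Int) (i : Nat) :
    (if i = 0 then (if i = 0 then (0:Int) else tickF tile_size tile_overlap (i-1)) + (tile_size - tile_overlap)
     else if i % 2 = 1 then (if i = 0 then (0:Int) else tickF tile_size tile_overlap (i-1)) + tile_overlap
     else (if i = 0 then (0:Int) else tickF tile_size tile_overlap (i-1)) + (tile_size - tile_overlap * 2))
      = tickF tile_size tile_overlap i := by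
  rcases Nat.eq_zero_or_pos i with h0 | hpos
  · subst h0; simp [tickF]
  · by_cases hodd : i % 2 = 1
    · have h1 : (i-1) % 2 = 0 := by omega
      have h2 : (i-1)/2 = i/2 := by omega
      simp only [tickF, if_neg (by omega : ¬ i = 0), if_pos hodd, h1, h2]
      norm_num
    · have h1 : (i-1) % 2 = 1 := by omega
      have h2 : i/2 = (i-1)/2 + 1 := by omega
      simp only [tickF, if_neg (by omega : ¬ i = 0), if_neg hodd, h1, h2]
      push_cast
      ring

-- A's loop from index i (previous value = tick (i-1), or 0 at i = 0) emits exactly the ticks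
-- i, i+1, …, i+m, where i+m is the first index at or after i whose tick reaches max_dim.
theorem loopA (max_dim tile_size tile_overlap : Int) :
    ∀ (m i fuel : Nat), m + 1 ≤ fuel →
      (∀ j, i ≤ j → j < i + m → tickF tile_size tile_overlap j < max_dim) →
      max_dim ≤ tickF tile_size tile_overlap (i + m) →
      (if i = 0 then (0:Int) else tickF tile_size tile_overlap (i-1)) < max_dim →
      cotA max_dim tile_size tile_overlap fuel i
          (if i = 0 then (0:Int) else tickF tile_size tile_overlap (i-1))
        = (List.range' i (m+1)).map (tickF tile_size tile_overlap) := by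
  intro m
  induction m with
  | zero =>
    intro i fuel hfuel _ hstop hd
    obtain ⟨f, rfl⟩ : ∃ f, fuel = f + 1 := ⟨fuel - 1, by omega⟩
    rw [cotA_succ, if_pos hd, stepA_tick]
    rw [cotA_stop _ _ _ _ _ _ (by simpa using hstop)]
    simp [List.range']
  | succ m ih =>
    intro i fuel hfuel hlt hstop hd
    obtain ⟨f, rfl⟩ : ∃ f, fuel = f + 1 := ⟨fuel - 1, by omega⟩
    rw [cotA_succ, if_pos hd, stepA_tick]
    have hrec := ih (i+1) f (by omega)
      (fun j hj1 hj2 => hlt j (by omega) (by omega))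
      (by rw [show i + 1 + m = i + (m+1) from by omega]; exact hstop)
      (by rw [if_neg (by omega : ¬ i + 1 = 0), show i + 1 - 1 = i from by omega]
          exact hlt i (le_refl i) (by omega))
    rw [if_neg (by omega : ¬ i + 1 = 0), show i + 1 - 1 = i from by omega] at hrec
    rw [hrec]
    conv_rhs => rw [List.range'_succ]
    rw [List.map_cons]

-- the body of B's list comprehension, at a nonnegative integer index, is the closed-form tick
theorem altf_cast (tile_size tile_overlap : Int) (t : Nat) :
    (PySem.Int.floordiv ((0:Int) + (t:Int)) 2 + 1) * (tile_size - tile_overlap)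
        + (if PySem.Int.mod ((0:Int) + (t:Int)) 2 ≠ 0 then tile_overlap else 0)
      = tickF tile_size tile_overlap t := by
  have h1 : PySem.Int.floordiv ((0:Int) + (t:Int)) 2 = ((t/2 : Nat) : Int) := by
    rw [zero_add]; exact_mod_cast PySem.Int.floordiv_natCast t 2
  have h2 : PySem.Int.mod ((0:Int) + (t:Int)) 2 = ((t%2 : Nat) : Int) := by
    rw [zero_add]; exact_mod_cast PySem.Int.mod_natCast t 2
  rw [h1, h2]
  unfold tickF
  rcases Nat.mod_two_eq_zero_or_one t with h | h <;> simp [h]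

-- B's comprehension over range(k+1) is the list of closed-form ticks 0..k
theorem alt_map (tile_size tile_overlap : Int) (n : Int) (k : Nat) (hn : n = (k:Int)+1) :
    (PySem.List.pyRange 0 n 1).map (fun j =>
        (PySem.Int.floordiv j 2 + 1) * (tile_size - tile_overlap)
          + (if PySem.Int.mod j 2 ≠ 0 then tile_overlap else 0))
      = (List.range' 0 (k+1)).map (tickF tile_size tile_overlap) := by
  subst hn
  rw [PySem.List.pyRange_one, List.map_map,
      show ((k:Int) + 1 - 0).toNat = k + 1 from by omega, ← List.range_eq_range']
  refine List.map_congr_left (fun t _ => ?_)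
  exact altf_cast tile_size tile_overlap t

-- B with max_dim > 0, written without the lets
theorem alt_unfold (max_dim tile_size tile_overlap : Int) (hm : ¬ max_dim ≤ 0) :
    calculate_overlap_ticks_alt max_dim tile_size tile_overlap
      = (PySem.List.pyRange 0
          (if max_dim ≤ tile_size - tile_overlap then 1
           else if max_dim ≤ tile_size then 2
           else min (2 * (-(PySem.Int.floordiv (-max_dim) (tile_size - tile_overlap)) - 1))
                    (2 * (-(PySem.Int.floordiv (-(max_dim - tile_overlap)) (tile_size - tile_overlap)) - 1) + 1) + 1) 1).map
        (fun j => (PySem.Int.floordiv j 2 + 1) * (tile_size - tile_overlap)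
          + (if PySem.Int.mod j 2 ≠ 0 then tile_overlap else 0)) := by
  unfold calculate_overlap_ticks_alt
  rw [if_neg hm]

-- ===== VERDICT (by name: the statement is the Claim_ definition above) =====
theorem calculate_overlap_ticks_spec : Claim_equal_calculate_overlap_ticks := by
  intro M s o _ pre
  unfold Spec_calculate_overlap_ticks calculate_overlap_ticks
  by_cases hm : M ≤ 0
  · rw [cotA_stop _ _ _ _ _ _ (by omega), calculate_overlap_ticks_alt, if_pos hm]
  · rw [alt_unfold M s o hm]
    have hM : 0 < M := by omega
    by_cases h1 : M ≤ s - o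
    · -- one tick
      rw [if_pos h1, alt_map s o 1 0 (by norm_num)]
      exact loopA M s o 0 0 _ (by omega) (fun j hj1 hj2 => by omega)
        (by unfold tickF; simpa using h1) (by simpa using hM)
    · rw [if_neg h1]
      by_cases h2 : M ≤ s
      · -- two ticks
        rw [if_pos h2, alt_map s o 2 1 (by norm_num)]
        refine loopA M s o 1 0 _ (by omega) ?_ ?_ (by simpa using hM)
        · intro j hj1 hj2
          have : j = 0 := by omega
          subst this
          unfold tickF; simpa using h1
        · unfold tickF; norm_num; omega
      · -- general case: Pre_ gives a positive net advance
        rw [if_neg h2]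
        have hP : 0 < s - o := by rcases pre with h | h | h <;> omega
        set ce : Int := -(PySem.Int.floordiv (-M) (s - o)) with hce_def
        set co : Int := -(PySem.Int.floordiv (-(M - o)) (s - o)) with hco_def
        have hce : (ce - 1) * (s - o) < M ∧ M ≤ ce * (s - o) :=
          (PySem.Int.neg_floordiv_neg_eq_iff_of_pos hP).mp rfl
        have hco : (co - 1) * (s - o) < M - o ∧ M - o ≤ co * (s - o) :=
          (PySem.Int.neg_floordiv_neg_eq_iff_of_pos hP).mp rfl
        have hce2 : 2 ≤ ce := by
          by_contra h
          have : ce * (s - o) ≤ 1 * (s - o) :=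
            mul_le_mul_of_nonneg_right (by omega) (by omega)
          omega
        have hco2 : 2 ≤ co := by
          by_contra h
          have : co * (s - o) ≤ 1 * (s - o) :=
            mul_le_mul_of_nonneg_right (by omega) (by omega)
          omega
        have hceM : ce ≤ M := by
          have : (ce - 1) * 1 ≤ (ce - 1) * (s - o) :=
            mul_le_mul_of_nonneg_left (by omega) (by omega)
          omega
        set js : Nat := min (2 * (ce.toNat - 1)) (2 * (co.toNat - 1) + 1) with hjs_def
        have hcast : (js : Int) = min (2 * (ce - 1)) (2 * (co - 1) + 1) := by omega
        rw [alt_map s o _ js (by omega)]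
        refine loopA M s o js 0 _ (by omega) ?_ ?_ (by simpa using hM)
        · -- every tick strictly before js is below M
          intro j _ hj2
          rcases Nat.even_or_odd j with ⟨k, hk⟩ | ⟨k, hk⟩
          · have hkb : (k : Int) + 1 ≤ ce - 1 := by omega
            have : ((k : Int) + 1) * (s - o) ≤ (ce - 1) * (s - o) :=
              mul_le_mul_of_nonneg_right hkb (by omega)
            unfold tickF
            rw [show j / 2 = k from by omega, show j % 2 = 0 from by omega]
            simp only [if_neg (by omega : ¬ (0:Nat) = 1)]
            omega
          · have hkb : (k : Int) + 1 ≤ co - 1 := by omega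
            have : ((k : Int) + 1) * (s - o) ≤ (co - 1) * (s - o) :=
              mul_le_mul_of_nonneg_right hkb (by omega)
            unfold tickF
            rw [show j / 2 = k from by omega, show j % 2 = 1 from by omega]
            norm_num
            omega
        · -- the tick at js reaches M
          rw [show 0 + js = js from by omega]
          unfold tickF
          rcases Nat.le_total (2 * (ce.toNat - 1)) (2 * (co.toNat - 1) + 1) with h | h
          · have hjs : js = 2 * (ce.toNat - 1) := by omega
            rw [hjs, show 2 * (ce.toNat - 1) / 2 = ce.toNat - 1 from by omega,
                show 2 * (ce.toNat - 1) % 2 = 0 from by omega]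
            simp only [if_neg (by omega : ¬ (0:Nat) = 1)]
            have : ((ce.toNat - 1 : Nat) : Int) + 1 = ce := by omega
            rw [this]
            omega
          · have hjs : js = 2 * (co.toNat - 1) + 1 := by omega
            rw [hjs, show (2 * (co.toNat - 1) + 1) / 2 = co.toNat - 1 from by omega,
                show (2 * (co.toNat - 1) + 1) % 2 = 1 from by omega]
            norm_num
            have : ((co.toNat - 1 : Nat) : Int) + 1 = co := by omega
            rw [this]
            omega
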